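-- pv_equiv track=rewrite | github.com/kavigupta/urbanstats | urbanstats/geometry/rle.py | rle_dict_from_arrays
-- ===== SOURCE A (Python) =====
-- from collections import defaultdict
--
-- def _merge_intervals(intervals):
--     """Merge overlapping/adjacent intervals. intervals is sorted list of (s, e)."""
--     if not intervals:
--         return []
--     merged = [intervals[0]]
--     for a, b in intervals[1:]:
--         if a <= merged[-1][1] + 1:
--             merged[-1] = (merged[-1][0], max(merged[-1][1], b))
--         else:
--             merged.append((a, b))
--     return merged
--
-- def rle_dict_from_arrays(rows, lon_starts, lon_ends):
--     """Convert array-format RLE to dict format: {row: [(lon_start, lon_end), ...]}."""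
--     by_row = defaultdict(list)
--     for i in range(len(rows)):
--         by_row[int(rows[i])].append((int(lon_starts[i]), int(lon_ends[i])))
--     return {
--         row: _merge_intervals(sorted(intervals))
--         for row, intervals in sorted(by_row.items())
--     }
-- ===== SOURCE B (Python) =====
-- def rle_dict_from_arrays(rows, lon_starts, lon_ends):
--     """Convert array-format RLE to dict format: {row: [(lon_start, lon_end), ...]}."""
--     triples = [(int(r), int(s), int(e)) for r, s, e in zip(rows, lon_starts, lon_ends)]
--     # two stable sorts = one lexicographic sort by (row, start, end)
--     triples.sort(key=lambda t: t[2])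
--     triples.sort(key=lambda t: (t[0], t[1]))
--     result = {}
--     cur = None  # open interval as (row, start, end)
--     for r, s, e in triples:
--         if cur is not None and r == cur[0] and s <= cur[2] + 1:
--             cur = (r, cur[1], max(cur[2], e))
--         else:
--             if cur is not None:
--                 result.setdefault(cur[0], []).append((cur[1], cur[2]))
--             cur = (r, s, e)
--     if cur is not None:
--         result.setdefault(cur[0], []).append((cur[1], cur[2]))
--     return result
-- ===== Notes on version B (the rewrite author's own statement) =====
-- stated objective: alternative
-- what changed: A groups intervals per row in a defaultdict, then sorts the keys and sorts+merges each row's interval list separately; B builds one flat list of (row, start, end) triples, sorts it once lexicographically (two stable sorts) and produces the whole dict in a single linear sweep with one open interval.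
import Mathlib
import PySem

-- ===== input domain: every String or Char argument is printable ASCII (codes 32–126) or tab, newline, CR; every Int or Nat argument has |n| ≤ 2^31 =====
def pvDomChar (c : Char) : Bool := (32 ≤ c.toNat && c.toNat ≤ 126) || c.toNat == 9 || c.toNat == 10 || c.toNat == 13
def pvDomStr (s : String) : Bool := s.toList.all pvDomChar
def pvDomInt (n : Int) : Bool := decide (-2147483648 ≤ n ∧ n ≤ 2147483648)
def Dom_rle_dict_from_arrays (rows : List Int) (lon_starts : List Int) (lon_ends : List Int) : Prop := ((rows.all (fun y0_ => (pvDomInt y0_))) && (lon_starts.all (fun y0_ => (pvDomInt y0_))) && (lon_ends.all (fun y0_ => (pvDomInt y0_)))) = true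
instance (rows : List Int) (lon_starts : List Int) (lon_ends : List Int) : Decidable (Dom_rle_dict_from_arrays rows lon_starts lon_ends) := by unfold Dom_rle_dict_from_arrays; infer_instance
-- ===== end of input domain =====

-- B replaces A's per-row dict grouping + per-row sort-and-merge by one flat lexicographic
-- sort of (row, start, end) triples followed by a single linear sweep (alternative decomposition).

-- ===== PORT A =====
-- merged[-1] = (…) / merged.append(…) on the accumulator list
def pvMergeStep (merged : List (Int × Int)) (ab : Int × Int) : List (Int × Int) :=
  match merged.getLast? with
  | some (s, e) =>
      if ab.1 ≤ e + 1 then merged.dropLast ++ [(s, max e ab.2)]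
      else merged ++ [ab]
  | none => [ab]   -- unreachable: the accumulator starts nonempty

-- _merge_intervals
def pvMergeIntervals (intervals : List (Int × Int)) : List (Int × Int) :=
  match intervals with
  | [] => []
  | x :: rest => rest.foldl pvMergeStep [x]

-- by_row = defaultdict(list); for i in range(len(rows)): by_row[int(rows[i])].append(...)
-- then {row: _merge_intervals(sorted(intervals)) for row, intervals in sorted(by_row.items())}.
-- sorted(by_row.items()): dict keys are distinct, so Python's tuple comparison never
-- reaches the list values — sorting the items by the key alone is exact here.
def rle_dict_from_arrays (rows : List Int) (lon_starts : List Int) (lon_ends : List Int) : List (Int × List (Int × Int)) :=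
  ((PySem.List.sorted
      ((PySem.List.pyRange 0 (PySem.List.len rows)).foldl
        (fun d i => d.modify (PySem.List.pyGetD rows i 0) []
          (fun l => l ++ [(PySem.List.pyGetD lon_starts i 0, PySem.List.pyGetD lon_ends i 0)]))
        PySem.Dict.empty).items
      (fun p => p.1)).foldl
    (fun d p => d.insert p.1
      (pvMergeIntervals (PySem.List.sorted2 p.2 (fun q => q.1) (fun q => q.2))))
    PySem.Dict.empty).items

-- ===== PORT B =====
def pvSweepStep (st : PySem.Dict Int (List (Int × Int)) × Option (Int × Int × Int))
    (t : Int × Int × Int) : PySem.Dict Int (List (Int × Int)) × Option (Int × Int × Int) :=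
  match st.2 with
  | some c =>
      if t.1 = c.1 ∧ t.2.1 ≤ c.2.2 + 1 then (st.1, some (t.1, c.2.1, max c.2.2 t.2.2))
      else (st.1.modify c.1 [] (fun l => l ++ [(c.2.1, c.2.2)]), some t)
  | none => (st.1, some t)

-- the final 'if cur is not None: … append the open interval'
def pvFinish (st : PySem.Dict Int (List (Int × Int)) × Option (Int × Int × Int)) :
    PySem.Dict Int (List (Int × Int)) :=
  match st.2 with
  | some c => st.1.modify c.1 [] (fun l => l ++ [(c.2.1, c.2.2)])
  | none => st.1

-- triples = [(int(r), int(s), int(e)) for r, s, e in zip(rows, lon_starts, lon_ends)];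
-- triples.sort(key=lambda t: t[2]); triples.sort(key=lambda t: (t[0], t[1])); then the sweep.
def rle_dict_from_arrays_alt (rows : List Int) (lon_starts : List Int) (lon_ends : List Int) : List (Int × List (Int × Int)) :=
  (pvFinish
    ((PySem.List.sorted2
        (PySem.List.sorted ((rows.zip (lon_starts.zip lon_ends)).map (fun t => (t.1, t.2.1, t.2.2)))
          (fun t => t.2.2))
        (fun t => t.1) (fun t => t.2.1)).foldl
      pvSweepStep (PySem.Dict.empty, none))).items

-- ===== PRECONDITION & SPEC =====
-- Pre_ excludes exactly the inputs on which A raises IndexError: rows longer than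
-- lon_starts or lon_ends (A indexes both by range(len(rows))).
def Pre_rle_dict_from_arrays (rows : List Int) (lon_starts : List Int) (lon_ends : List Int) : Prop :=
  rows.length ≤ lon_starts.length ∧ rows.length ≤ lon_ends.length
instance (rows : List Int) (lon_starts : List Int) (lon_ends : List Int) : Decidable (Pre_rle_dict_from_arrays rows lon_starts lon_ends) := by unfold Pre_rle_dict_from_arrays; infer_instance

def pvWitness_rle_dict_from_arrays : List Int × List Int × List Int :=
  ([2, 1, 2], [0, 5, 3], [1, 7, 4])

def Spec_rle_dict_from_arrays (rows : List Int) (lon_starts : List Int) (lon_ends : List Int) (out : List (Int × List (Int × Int))) : Prop := out = rle_dict_from_arrays_alt rows lon_starts lon_ends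
instance (rows : List Int) (lon_starts : List Int) (lon_ends : List Int) (out : List (Int × List (Int × Int))) : Decidable (Spec_rle_dict_from_arrays rows lon_starts lon_ends out) := by unfold Spec_rle_dict_from_arrays; infer_instance

-- ===== CLAIM (what is proved, stated in full; the proofs are below) =====
def Claim_equal_rle_dict_from_arrays : Prop := ∀ (rows : List Int) (lon_starts : List Int) (lon_ends : List Int), Dom_rle_dict_from_arrays rows lon_starts lon_ends → Pre_rle_dict_from_arrays rows lon_starts lon_ends → Spec_rle_dict_from_arrays rows lon_starts lon_ends (rle_dict_from_arrays rows lon_starts lon_ends)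
-- ===== LEMMAS AND PROOFS =====

-- ---------- shared vocabulary ----------
def pvZip3 (rows ss es : List Int) : List (Int × Int × Int) := rows.zip (ss.zip es)

def pvGather (xs : List (Int × Int × Int)) (k : Int) : List (Int × Int) :=
  (xs.filter (fun p => p.1 == k)).map (fun p => p.2)

def pvStep (d : PySem.Dict Int (List (Int × Int))) (p : Int × Int × Int) :
    PySem.Dict Int (List (Int × Int)) :=
  d.modify p.1 [] (fun l => l ++ [p.2])

def pvSortedRows (zs : List (Int × Int × Int)) : List Int :=
  PySem.List.sorted (PySem.Set.ofList (zs.map (fun t => t.1))) (fun x => x)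

def pvPk (zs : List (Int × Int × Int)) (k : Int) : List (Int × Int) :=
  PySem.List.sorted2 (pvGather zs k) (fun q => q.1) (fun q => q.2)

def pvMrec (s e : Int) : List (Int × Int) → List (Int × Int) × (Int × Int)
  | [] => ([], (s, e))
  | (a, b) :: t =>
      if a ≤ e + 1 then pvMrec s (max e b) t
      else let m := pvMrec a b t; ((s, e) :: m.1, m.2)

def pvMergeList : List (Int × Int) → List (Int × Int)
  | [] => []
  | (s, e) :: t => (pvMrec s e t).1 ++ [(pvMrec s e t).2]

def pvCanon (zs : List (Int × Int × Int)) : List (Int × List (Int × Int)) :=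
  (pvSortedRows zs).map (fun k => (k, pvMergeList (pvPk zs k)))

def pvBlock (zs : List (Int × Int × Int)) (k : Int) : List (Int × Int × Int) :=
  (pvPk zs k).map (fun p => (k, p.1, p.2))

def pvL (zs : List (Int × Int × Int)) : List (Int × Int × Int) :=
  (pvSortedRows zs).flatMap (pvBlock zs)

def pvFL (zs : List (Int × Int × Int)) : List (Int × Int × Int) :=
  (pvSortedRows zs).flatMap (fun k => (pvMergeList (pvPk zs k)).map (fun p => (k, p)))

def pvLe3 (a b : Int × Int × Int) : Prop :=
  a.1 < b.1 ∨ (a.1 = b.1 ∧ (a.2.1 < b.2.1 ∨ (a.2.1 = b.2.1 ∧ a.2.2 ≤ b.2.2)))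

-- the flush sequence of B's sweep
def pvF : Option (Int × Int × Int) → List (Int × Int × Int) → List (Int × Int × Int)
  | none, [] => []
  | some c, [] => [(c.1, c.2)]
  | none, t :: xs => pvF (some t) xs
  | some c, t :: xs =>
      if t.1 = c.1 ∧ t.2.1 ≤ c.2.2 + 1 then pvF (some (t.1, c.2.1, max c.2.2 t.2.2)) xs
      else (c.1, c.2) :: pvF (some t) xs

-- ---------- dict lemmas ----------
lemma pv_get?_map_keys (S : List Int) (g : Int → List (Int × Int)) (hS : S.Nodup) (k : Int) :
    (PySem.Dict.mk (S.map (fun k' => (k', g k')))).get? k = if k ∈ S then some (g k) else none := by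
  induction S with
  | nil => simp [PySem.Dict.get?]
  | cons a S ih =>
    rw [List.map_cons, PySem.Dict.get?_mk_cons]
    by_cases hak : a = k
    · subst hak; simp
    · have hb : (a == k) = false := by simpa using hak
      rw [hb]
      simp only [Bool.false_eq_true, if_false]
      rw [ih (List.Nodup.of_cons hS)]
      simp [List.mem_cons, Ne.symm hak]

lemma pv_contains_map_keys (S : List Int) (g : Int → List (Int × Int)) (k : Int) :
    (PySem.Dict.mk (S.map (fun k' => (k', g k')))).contains k = decide (k ∈ S) := by
  rw [PySem.Dict.contains_mk, Bool.eq_iff_iff, List.any_eq_true, decide_eq_true_iff]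
  constructor
  · rintro ⟨q, hq, hbeq⟩
    obtain ⟨k', hk', rfl⟩ := List.mem_map.mp hq
    have : k' = k := by simpa using hbeq
    exact this ▸ hk'
  · intro hk
    exact ⟨(k, g k), List.mem_map_of_mem hk, by simp⟩

lemma pvDictOf_items (xs : List (Int × Int × Int)) :
    (xs.foldl pvStep PySem.Dict.empty).items
      = (PySem.Set.ofList (xs.map (fun t => t.1))).map (fun k => (k, pvGather xs k)) := by
  induction xs using List.reverseRecOn with
  | nil => simp [PySem.Dict.empty, PySem.Set.ofList, pvGather]
  | append_singleton xs p ih =>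
    have hD : xs.foldl pvStep PySem.Dict.empty
        = PySem.Dict.mk ((PySem.Set.ofList (xs.map (fun t => t.1))).map (fun k => (k, pvGather xs k))) :=
      PySem.Dict.ext ih
    rw [List.foldl_append, List.foldl_cons, List.foldl_nil, hD]
    have hSnd : (PySem.Set.ofList (xs.map (fun t => t.1))).Nodup := PySem.Set.nodup_ofList _
    have hg : ∀ k, pvGather (xs ++ [p]) k
        = pvGather xs k ++ (if p.1 = k then [p.2] else []) := by
      intro k
      simp only [pvGather, List.filter_append, List.map_append]
      congr 1
      by_cases h : p.1 = k
      · simp [List.filter, h]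
      · have : (p.1 == k) = false := by simpa using h
        simp [List.filter, this, h]
    have hS' : PySem.Set.ofList ((xs ++ [p]).map (fun t => t.1))
        = (PySem.Set.ofList (xs.map (fun t => t.1))).add p.1 := by
      rw [List.map_append, PySem.Set.ofList_eq_foldl, List.foldl_append, ← PySem.Set.ofList_eq_foldl]
      rfl
    show ((PySem.Dict.mk _).modify p.1 [] (fun l => l ++ [p.2])).items = _
    unfold PySem.Dict.modify
    have hget : (PySem.Dict.mk ((PySem.Set.ofList (xs.map (fun t => t.1))).map
        (fun k => (k, pvGather xs k)))).getD p.1 [] =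
        if p.1 ∈ PySem.Set.ofList (xs.map (fun t => t.1)) then pvGather xs p.1 else [] := by
      unfold PySem.Dict.getD
      rw [pv_get?_map_keys _ _ hSnd]
      by_cases hp : p.1 ∈ PySem.Set.ofList (xs.map (fun t => t.1)) <;> simp [hp]
    by_cases hp : p.1 ∈ PySem.Set.ofList (xs.map (fun t => t.1))
    · have hc : (PySem.Dict.mk ((PySem.Set.ofList (xs.map (fun t => t.1))).map
          (fun k => (k, pvGather xs k)))).contains p.1 = true := by
        rw [pv_contains_map_keys]; simp [hp]
      rw [PySem.Dict.items_insert, hc, if_pos rfl, hget, if_pos hp, hS',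
        PySem.Set.add_of_mem hp]
      rw [List.map_map]
      apply List.map_congr_left
      intro k hk
      by_cases hkp : k = p.1
      · subst hkp
        simp [hg]
      · have hb : (k == p.1) = false := by simpa using hkp
        simp only [Function.comp_apply, hb, Bool.false_eq_true, if_false, hg k,
          if_neg (fun h : p.1 = k => hkp h.symm), List.append_nil]
    · have hc : (PySem.Dict.mk ((PySem.Set.ofList (xs.map (fun t => t.1))).map
          (fun k => (k, pvGather xs k)))).contains p.1 = false := by
        rw [pv_contains_map_keys]; simp [hp]
      have hgnil : pvGather xs p.1 = [] := by
        unfold pvGather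
        rw [List.filter_eq_nil_iff.mpr, List.map_nil]
        intro t ht
        have : t.1 ∈ xs.map (fun t => t.1) := List.mem_map_of_mem ht
        have hne : t.1 ≠ p.1 := by
          intro he; exact hp ((PySem.Set.mem_ofList _ _).mpr (he ▸ this))
        simpa using hne
      rw [PySem.Dict.items_insert, hc, hget, if_neg hp, hS', PySem.Set.add_of_not_mem hp]
      simp only [Bool.false_eq_true, if_false, List.map_append, List.map_cons, List.map_nil]
      congr 1
      · apply List.map_congr_left
        intro k hk
        have hne : p.1 ≠ k := fun he => hp (he ▸ hk)
        simp [hg, hne]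
      · simp [hg, hgnil]

lemma pv_items_foldl_insert (f : Int × List (Int × Int) → List (Int × Int)) :
    ∀ (l : List (Int × List (Int × Int))) (d : PySem.Dict Int (List (Int × Int))),
      (∀ p ∈ l, d.contains p.1 = false) → (l.map (fun p => p.1)).Nodup →
      (l.foldl (fun d p => d.insert p.1 (f p)) d).items = d.items ++ l.map (fun p => (p.1, f p)) := by
  intro l
  induction l with
  | nil => intro d _ _; simp
  | cons p l ih =>
    intro d hc hnd
    rw [List.map_cons] at hnd
    obtain ⟨hhd, htl⟩ := List.nodup_cons.mp hnd
    rw [List.foldl_cons]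
    have h1 : ∀ q ∈ l, (d.insert p.1 (f p)).contains q.1 = false := by
      intro q hq
      rw [PySem.Dict.contains_insert]
      have hne : q.1 ≠ p.1 := fun he => hhd (he ▸ List.mem_map_of_mem hq)
      simp [hne, hc q (List.mem_cons_of_mem _ hq)]
    rw [ih _ h1 htl, PySem.Dict.items_insert_of_not_contains _ _ (hc p (List.mem_cons_self))]
    simp

-- ---------- stable insertion sort ----------
lemma pv_insertBy_pairwise {α : Type} (lt : α → α → Bool)
    (q : α → α → Prop)
    (hasym : ∀ a b, lt a b = true → lt b a = false)
    (htr : ∀ a b c, lt a b = true → lt c b = false → lt a c = true) (x : α) :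
    ∀ acc : List α,
      acc.Pairwise (fun a b => lt b a = false ∧ (lt a b = true ∨ q a b)) →
      (∀ y ∈ acc, q y x) →
      (PySem.List.insertBy lt x acc).Pairwise (fun a b => lt b a = false ∧ (lt a b = true ∨ q a b)) := by
  intro acc
  induction acc with
  | nil => intro _ _; simp [PySem.List.insertBy]
  | cons y ys ih =>
    intro hpw hq
    obtain ⟨hy, hys⟩ := List.pairwise_cons.mp hpw
    show List.Pairwise _ (if lt x y = true then x :: y :: ys else y :: PySem.List.insertBy lt x ys)
    by_cases hxy : lt x y = true
    · rw [if_pos hxy]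
      refine List.pairwise_cons.mpr ⟨?_, hpw⟩
      intro w hw
      rcases List.mem_cons.mp hw with hwy | hwys
      · subst hwy; exact ⟨hasym _ _ hxy, Or.inl hxy⟩
      · have hw' := hy w hwys
        have hxw : lt x w = true := htr x y w hxy hw'.1
        exact ⟨hasym _ _ hxw, Or.inl hxw⟩
    · rw [if_neg hxy]
      refine List.pairwise_cons.mpr ⟨?_, ih hys (fun z hz => hq z (List.mem_cons_of_mem _ hz))⟩
      intro w hw
      rcases (PySem.List.mem_insertBy lt x w ys).mp hw with hwx | hwys
      · subst hwx
        exact ⟨Bool.not_eq_true _ ▸ hxy, Or.inr (hq y List.mem_cons_self)⟩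
      · exact hy w hwys

lemma pv_foldl_insertBy_pairwise {α : Type} (lt : α → α → Bool)
    (q : α → α → Prop)
    (hasym : ∀ a b, lt a b = true → lt b a = false)
    (htr : ∀ a b c, lt a b = true → lt c b = false → lt a c = true) :
    ∀ (xs acc : List α),
      acc.Pairwise (fun a b => lt b a = false ∧ (lt a b = true ∨ q a b)) → xs.Pairwise q →
      (∀ y ∈ acc, ∀ z ∈ xs, q y z) →
      (xs.foldl (fun acc x => PySem.List.insertBy lt x acc) acc).Pairwise
        (fun a b => lt b a = false ∧ (lt a b = true ∨ q a b)) := by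
  intro xs
  induction xs with
  | nil => intro acc hacc _ _; simpa using hacc
  | cons x xs ih =>
    intro acc hacc hxs hcross
    obtain ⟨hx, hxs'⟩ := List.pairwise_cons.mp hxs
    rw [List.foldl_cons]
    refine ih _ (pv_insertBy_pairwise lt q hasym htr x acc hacc
      (fun y hy => hcross y hy x List.mem_cons_self)) hxs' ?_
    intro y hy z hz
    rcases (PySem.List.mem_insertBy lt x y acc).mp hy with hyx | hyacc
    · exact hyx ▸ hx z hz
    · exact hcross y hyacc z (List.mem_cons_of_mem _ hz)

lemma pv_pairwise_true {α : Type} (l : List α) : l.Pairwise (fun _ _ => True) := by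
  induction l with
  | nil => exact List.Pairwise.nil
  | cons a t ih => exact List.Pairwise.cons (fun _ _ => trivial) ih

-- pairwise order of B's two stable sorts: full lexicographic ≤ on triples
lemma pv_triples_pairwise (zs : List (Int × Int × Int)) :
    (PySem.List.sorted2 (PySem.List.sorted zs (fun t => t.2.2)) (fun t => t.1) (fun t => t.2.1)).Pairwise pvLe3 := by
  have h1 : (PySem.List.sorted zs (fun t => t.2.2)).Pairwise (fun a b => a.2.2 ≤ b.2.2) := by
    have h := pv_foldl_insertBy_pairwise (fun (a b : Int × Int × Int) => decide (a.2.2 < b.2.2))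
      (fun _ _ => True)
      (by intro a b h; simp at h ⊢; omega)
      (by intro a b c ha hb; simp at ha hb ⊢; omega)
      zs [] List.Pairwise.nil (pv_pairwise_true zs) (by simp)
    rw [PySem.List.sorted_eq_foldl_insertBy]
    exact h.imp (fun hab => by have := hab.1; simp at this; omega)
  have h2 := pv_foldl_insertBy_pairwise
      (fun (a b : Int × Int × Int) => decide (a.1 < b.1) || (!decide (b.1 < a.1) && decide (a.2.1 < b.2.1)))
      (fun a b => a.2.2 ≤ b.2.2)
      (by intro a b h; simp at h ⊢; omega)
      (by intro a b c ha hb; simp at ha hb ⊢; omega)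
      (PySem.List.sorted zs (fun t => t.2.2)) [] List.Pairwise.nil h1 (by simp)
  have hrfl : PySem.List.sorted2 (PySem.List.sorted zs (fun t => t.2.2)) (fun t => t.1) (fun t => t.2.1)
      = (PySem.List.sorted zs (fun t => t.2.2)).foldl
        (fun acc x => PySem.List.insertBy
          (fun a b => decide (a.1 < b.1) || (!decide (b.1 < a.1) && decide (a.2.1 < b.2.1))) x acc) [] := rfl
  rw [hrfl]
  refine h2.imp ?_
  intro a b hab
  obtain ⟨hba, hrest⟩ := hab
  simp at hba hrest
  unfold pvLe3
  omega

-- pairwise order of A's per-row sort: lexicographic ≤ on pairs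
lemma pv_pk_pairwise (zs : List (Int × Int × Int)) (k : Int) :
    (pvPk zs k).Pairwise (fun a b => a.1 < b.1 ∨ (a.1 = b.1 ∧ a.2 ≤ b.2)) := by
  have h := pv_foldl_insertBy_pairwise
      (fun (a b : Int × Int) => decide (a.1 < b.1) || (!decide (b.1 < a.1) && decide (a.2 < b.2)))
      (fun _ _ => True)
      (by intro a b h; simp at h ⊢; omega)
      (by intro a b c ha hb; simp at ha hb ⊢; omega)
      (pvGather zs k) [] List.Pairwise.nil (pv_pairwise_true _) (by simp)
  have hrfl : pvPk zs k = (pvGather zs k).foldl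
      (fun acc x => PySem.List.insertBy
        (fun (a b : Int × Int) => decide (a.1 < b.1) || (!decide (b.1 < a.1) && decide (a.2 < b.2))) x acc) [] := rfl
  rw [hrfl]
  refine h.imp ?_
  intro a b hab
  have := hab.1
  simp at this
  omega

-- ---------- pvL : the lex-sorted arrangement ----------
lemma pv_block_fst {zs : List (Int × Int × Int)} {k : Int} {t : Int × Int × Int}
    (ht : t ∈ pvBlock zs k) : t.1 = k := by
  obtain ⟨p, _, rfl⟩ := List.mem_map.mp ht; rfl

lemma pv_L_pairwise_aux (zs : List (Int × Int × Int)) :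
    ∀ ks : List Int, ks.Pairwise (· < ·) → (ks.flatMap (pvBlock zs)).Pairwise pvLe3 := by
  intro ks
  induction ks with
  | nil => intro _; simp
  | cons k t ih =>
    intro hpw
    obtain ⟨hk, ht⟩ := List.pairwise_cons.mp hpw
    rw [List.flatMap_cons]
    refine List.pairwise_append.mpr ⟨?_, ih ht, ?_⟩
    · refine List.Pairwise.map _ ?_ (pv_pk_pairwise zs k)
      intro a b hab
      unfold pvLe3
      dsimp only
      omega
    · intro a ha b hb
      have ha1 := pv_block_fst ha
      obtain ⟨k', hk', hb'⟩ := List.mem_flatMap.mp hb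
      have hb1 := pv_block_fst hb'
      unfold pvLe3
      left
      rw [ha1, hb1]
      exact hk k' hk'

lemma pv_L_pairwise (zs : List (Int × Int × Int)) : (pvL zs).Pairwise pvLe3 := by
  unfold pvL pvSortedRows
  exact pv_L_pairwise_aux zs _ (PySem.List.sorted_ofList_pairwise_lt _)

lemma pv_flatMap_congr {α : Type} (f g : Int → List α) :
    ∀ ks : List Int, (∀ k ∈ ks, f k = g k) → ks.flatMap f = ks.flatMap g := by
  intro ks
  induction ks with
  | nil => intro _; rfl
  | cons k t ih =>
    intro h
    rw [List.flatMap_cons, List.flatMap_cons, h k List.mem_cons_self,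
      ih (fun k' hk' => h k' (List.mem_cons_of_mem _ hk'))]

lemma pv_flatMap_perm {α : Type} (f g : Int → List α) :
    ∀ ks : List Int, (∀ k ∈ ks, (f k).Perm (g k)) → (ks.flatMap f).Perm (ks.flatMap g) := by
  intro ks
  induction ks with
  | nil => intro _; rfl
  | cons k t ih =>
    intro h
    rw [List.flatMap_cons, List.flatMap_cons]
    exact (h k List.mem_cons_self).append (ih (fun k' hk' => h k' (List.mem_cons_of_mem _ hk')))

lemma pv_perm_filter_flat : ∀ (ks : List Int) (l : List (Int × Int × Int)), ks.Nodup →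
    (∀ t ∈ l, t.1 ∈ ks) → (ks.flatMap (fun k => l.filter (fun t => t.1 == k))).Perm l := by
  intro ks
  induction ks with
  | nil =>
    intro l _ hcov
    have : l = [] := List.eq_nil_iff_forall_not_mem.mpr (fun t ht => by simpa using hcov t ht)
    simp [this]
  | cons k t ih =>
    intro l hnd hcov
    obtain ⟨hk, ht⟩ := List.nodup_cons.mp hnd
    rw [List.flatMap_cons]
    have hsub : ∀ k' ∈ t, l.filter (fun x => x.1 == k')
        = (l.filter (fun x => !(x.1 == k))).filter (fun x => x.1 == k') := by
      intro k' hk'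
      rw [List.filter_filter]
      apply List.filter_congr
      intro x _
      by_cases h : x.1 = k'
      · have hkk : k' ≠ k := fun he => hk (he ▸ hk')
        simp [h, hkk]
      · have : (x.1 == k') = false := by simpa using h
        simp [this]
    rw [pv_flatMap_congr _ _ t hsub]
    have hcov' : ∀ x ∈ l.filter (fun x => !(x.1 == k)), x.1 ∈ t := by
      intro x hx
      have hxl := List.mem_of_mem_filter hx
      have hxf := List.of_mem_filter hx
      have : x.1 ≠ k := by simpa using hxf
      rcases List.mem_cons.mp (hcov x hxl) with h | h
      · exact absurd h this
      · exact h
    exact ((ih _ ht hcov').append_left _).trans (List.filter_append_perm _ l)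

lemma pv_block_perm (zs : List (Int × Int × Int)) (k : Int) :
    (pvBlock zs k).Perm (zs.filter (fun t => t.1 == k)) := by
  have h2 := (PySem.List.sorted2_perm (pvGather zs k) (fun q => q.1) (fun q => q.2) false).map
    (fun p : Int × Int => (k, p.1, p.2))
  refine h2.trans ?_
  unfold pvGather
  rw [List.map_map]
  have heq : ∀ x ∈ zs.filter (fun t => t.1 == k),
      ((fun p : Int × Int => (k, p.1, p.2)) ∘ (fun p : Int × Int × Int => p.2)) x = x := by
    intro x hx
    have ht1 : x.1 = k := by simpa using List.of_mem_filter hx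
    obtain ⟨x1, x2, x3⟩ := x
    simp only [Function.comp_apply]
    simp only at ht1
    rw [ht1]
  rw [List.map_congr_left heq]
  simp

lemma pv_sortedRows_nodup (zs : List (Int × Int × Int)) : (pvSortedRows zs).Nodup := by
  unfold pvSortedRows
  exact (PySem.List.sorted_perm _ _ _).nodup_iff.mpr (PySem.Set.nodup_ofList _)

lemma pv_L_perm (zs : List (Int × Int × Int)) : (pvL zs).Perm zs := by
  unfold pvL
  have hnd : (pvSortedRows zs).Nodup := pv_sortedRows_nodup zs
  have hcov : ∀ t ∈ zs, t.1 ∈ pvSortedRows zs := by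
    intro t ht
    unfold pvSortedRows
    rw [PySem.List.mem_sorted]
    exact (PySem.Set.mem_ofList _ _).mpr (List.mem_map_of_mem ht)
  exact (pv_flatMap_perm _ _ _ (fun k _ => pv_block_perm zs k)).trans
    (pv_perm_filter_flat _ zs hnd hcov)

lemma pv_triples_eq_L (zs : List (Int × Int × Int)) :
    PySem.List.sorted2 (PySem.List.sorted zs (fun t => t.2.2)) (fun t => t.1) (fun t => t.2.1) = pvL zs := by
  refine List.Perm.eq_of_pairwise ?_ (pv_triples_pairwise zs) (pv_L_pairwise zs) ?_
  · intro a b _ _ h1 h2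
    unfold pvLe3 at h1 h2
    obtain ⟨a1, a2, a3⟩ := a
    obtain ⟨b1, b2, b3⟩ := b
    simp only at h1 h2
    simp only [Prod.mk.injEq]
    omega
  · exact ((PySem.List.sorted2_perm _ _ _ _).trans (PySem.List.sorted_perm _ _ _)).trans
      (pv_L_perm zs).symm

-- ---------- the sweep ----------
lemma pv_sweep_finish : ∀ (xs : List (Int × Int × Int)) (d : PySem.Dict Int (List (Int × Int)))
    (cur : Option (Int × Int × Int)),
    pvFinish (xs.foldl pvSweepStep (d, cur)) = (pvF cur xs).foldl pvStep d := by
  intro xs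
  induction xs with
  | nil =>
    intro d cur
    cases cur with
    | none => rfl
    | some c => rfl
  | cons t xs ih =>
    intro d cur
    rw [List.foldl_cons]
    cases cur with
    | none => exact ih d (some t)
    | some c =>
      by_cases h : t.1 = c.1 ∧ t.2.1 ≤ c.2.2 + 1
      · have h1 : pvSweepStep (d, some c) t = (d, some (t.1, c.2.1, max c.2.2 t.2.2)) := by
          show (if t.1 = c.1 ∧ t.2.1 ≤ c.2.2 + 1 then ((d, some c).1, some (t.1, c.2.1, max c.2.2 t.2.2))
            else ((d, some c).1.modify c.1 [] (fun l => l ++ [(c.2.1, c.2.2)]), some t)) = _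
          rw [if_pos h]
        have h2 : pvF (some c) (t :: xs) = pvF (some (t.1, c.2.1, max c.2.2 t.2.2)) xs := by
          show (if t.1 = c.1 ∧ t.2.1 ≤ c.2.2 + 1 then pvF (some (t.1, c.2.1, max c.2.2 t.2.2)) xs
            else (c.1, c.2) :: pvF (some t) xs) = _
          rw [if_pos h]
        rw [h1, ih, h2]
      · have h1 : pvSweepStep (d, some c) t
            = (d.modify c.1 [] (fun l => l ++ [(c.2.1, c.2.2)]), some t) := by
          show (if t.1 = c.1 ∧ t.2.1 ≤ c.2.2 + 1 then ((d, some c).1, some (t.1, c.2.1, max c.2.2 t.2.2))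
            else ((d, some c).1.modify c.1 [] (fun l => l ++ [(c.2.1, c.2.2)]), some t)) = _
          rw [if_neg h]
        have h2 : pvF (some c) (t :: xs) = (c.1, c.2) :: pvF (some t) xs := by
          show (if t.1 = c.1 ∧ t.2.1 ≤ c.2.2 + 1 then pvF (some (t.1, c.2.1, max c.2.2 t.2.2)) xs
            else (c.1, c.2) :: pvF (some t) xs) = _
          rw [if_neg h]
        rw [h1, ih, h2, List.foldl_cons]
        rfl

lemma pv_F_block (k : Int) : ∀ (ps : List (Int × Int)) (s e : Int) (xs : List (Int × Int × Int)),
    pvF (some (k, s, e)) ((ps.map (fun p => (k, p.1, p.2))) ++ xs)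
      = ((pvMrec s e ps).1).map (fun p => (k, p)) ++ pvF (some (k, (pvMrec s e ps).2)) xs := by
  intro ps
  induction ps with
  | nil => intro s e xs; rfl
  | cons p t ih =>
    intro s e xs
    obtain ⟨a, b⟩ := p
    rw [List.map_cons, List.cons_append]
    show pvF (some (k, s, e)) ((k, a, b) :: _) = _
    by_cases h : a ≤ e + 1
    · have hg : (k, a, b).1 = (k, s, e).1 ∧ (k, a, b).2.1 ≤ (k, s, e).2.2 + 1 := ⟨rfl, h⟩
      have hm : pvMrec s e ((a, b) :: t) = pvMrec s (max e b) t := by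
        show (if a ≤ e + 1 then pvMrec s (max e b) t
          else ((s, e) :: (pvMrec a b t).1, (pvMrec a b t).2)) = _
        rw [if_pos h]
      show (if (k, a, b).1 = (k, s, e).1 ∧ (k, a, b).2.1 ≤ (k, s, e).2.2 + 1
          then pvF (some ((k, a, b).1, (k, s, e).2.1, max (k, s, e).2.2 (k, a, b).2.2)) _
          else ((k, s, e).1, (k, s, e).2) :: pvF (some (k, a, b)) _) = _
      rw [if_pos hg, hm]
      exact ih s (max e b) xs
    · have hg : ¬((k, a, b).1 = (k, s, e).1 ∧ (k, a, b).2.1 ≤ (k, s, e).2.2 + 1) := by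
        intro hc; exact h hc.2
      have hm : pvMrec s e ((a, b) :: t) = ((s, e) :: (pvMrec a b t).1, (pvMrec a b t).2) := by
        show (if a ≤ e + 1 then pvMrec s (max e b) t
          else ((s, e) :: (pvMrec a b t).1, (pvMrec a b t).2)) = _
        rw [if_neg h]
      show (if (k, a, b).1 = (k, s, e).1 ∧ (k, a, b).2.1 ≤ (k, s, e).2.2 + 1
          then pvF (some ((k, a, b).1, (k, s, e).2.1, max (k, s, e).2.2 (k, a, b).2.2)) _
          else ((k, s, e).1, (k, s, e).2) :: pvF (some (k, a, b)) _) = _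
      rw [if_neg hg, hm, ih a b xs, List.map_cons]
      rfl

lemma pv_pk_ne_nil (zs : List (Int × Int × Int)) (k : Int) (hk : k ∈ pvSortedRows zs) :
    pvPk zs k ≠ [] := by
  unfold pvSortedRows at hk
  rw [PySem.List.mem_sorted] at hk
  rw [PySem.Set.mem_ofList] at hk
  obtain ⟨t, ht, hteq⟩ := List.mem_map.mp hk
  intro hnil
  have hperm := PySem.List.sorted2_perm (pvGather zs k) (fun q => q.1) (fun q => q.2) false
  have hgnil : pvGather zs k = [] := by
    have h2 := hperm
    unfold pvPk at hnil
    rw [hnil] at h2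
    exact h2.symm.eq_nil
  have : t.2 ∈ pvGather zs k := by
    unfold pvGather
    exact List.mem_map_of_mem (List.mem_filter.mpr ⟨ht, by simpa using hteq⟩)
  rw [hgnil] at this
  exact absurd this (List.not_mem_nil)

lemma pv_F_flat (zs : List (Int × Int × Int)) :
    ∀ ks : List Int, ks.Pairwise (· < ·) → (∀ k ∈ ks, pvPk zs k ≠ []) →
    pvF none (ks.flatMap (pvBlock zs)) = ks.flatMap (fun k => (pvMergeList (pvPk zs k)).map (fun p => (k, p))) := by
  intro ks
  induction ks with
  | nil => intro _ _; rfl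
  | cons k t ih =>
    intro hpw hne
    obtain ⟨hklt, ht⟩ := List.pairwise_cons.mp hpw
    obtain ⟨p0, ps, hps⟩ := List.exists_cons_of_ne_nil (hne k List.mem_cons_self)
    rw [List.flatMap_cons]
    have hblock : pvBlock zs k = (k, p0.1, p0.2) :: ps.map (fun p => (k, p.1, p.2)) := by
      unfold pvBlock
      rw [hps, List.map_cons]
    rw [hblock, List.cons_append]
    show pvF (some (k, p0.1, p0.2)) (ps.map (fun p => (k, p.1, p.2)) ++ t.flatMap (pvBlock zs)) = _
    rw [pv_F_block k ps p0.1 p0.2 _]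
    have hmerge : pvMergeList (pvPk zs k)
        = (pvMrec p0.1 p0.2 ps).1 ++ [(pvMrec p0.1 p0.2 ps).2] := by
      rw [hps]
      obtain ⟨s0, e0⟩ := p0
      rfl
    cases t with
    | nil =>
      show _ ++ [(k, (pvMrec p0.1 p0.2 ps).2)] = (pvMergeList (pvPk zs k)).map (fun p => (k, p)) ++ []
      rw [hmerge, List.map_append, List.append_nil]
      rfl
    | cons k1 t1 =>
      obtain ⟨q0, qs, hqs⟩ := List.exists_cons_of_ne_nil (hne k1 (List.mem_cons_of_mem _ List.mem_cons_self))
      have hblock1 : pvBlock zs k1 = (k1, q0.1, q0.2) :: qs.map (fun p => (k1, p.1, p.2)) := by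
        unfold pvBlock
        rw [hqs, List.map_cons]
      rw [List.flatMap_cons, hblock1, List.cons_append]
      have hk1 : k < k1 := hklt k1 List.mem_cons_self
      have hgneg : ¬((k1, q0.1, q0.2).1 = (k, (pvMrec p0.1 p0.2 ps).2).1
          ∧ (k1, q0.1, q0.2).2.1 ≤ (k, (pvMrec p0.1 p0.2 ps).2).2.2 + 1) := by
        intro hc
        have : k1 = k := hc.1
        omega
      have hstep : pvF (some (k, (pvMrec p0.1 p0.2 ps).2))
          ((k1, q0.1, q0.2) :: (qs.map (fun p => (k1, p.1, p.2)) ++ t1.flatMap (pvBlock zs)))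
          = ((k, (pvMrec p0.1 p0.2 ps).2).1, (k, (pvMrec p0.1 p0.2 ps).2).2)
            :: pvF (some (k1, q0.1, q0.2)) (qs.map (fun p => (k1, p.1, p.2)) ++ t1.flatMap (pvBlock zs)) := by
        show (if (k1, q0.1, q0.2).1 = (k, (pvMrec p0.1 p0.2 ps).2).1
              ∧ (k1, q0.1, q0.2).2.1 ≤ (k, (pvMrec p0.1 p0.2 ps).2).2.2 + 1
            then pvF (some ((k1, q0.1, q0.2).1, (k, (pvMrec p0.1 p0.2 ps).2).2.1,
              max (k, (pvMrec p0.1 p0.2 ps).2).2.2 (k1, q0.1, q0.2).2.2))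
              (qs.map (fun p => (k1, p.1, p.2)) ++ t1.flatMap (pvBlock zs))
            else ((k, (pvMrec p0.1 p0.2 ps).2).1, (k, (pvMrec p0.1 p0.2 ps).2).2)
              :: pvF (some (k1, q0.1, q0.2)) (qs.map (fun p => (k1, p.1, p.2)) ++ t1.flatMap (pvBlock zs))) = _
        rw [if_neg hgneg]
      rw [hstep]
      have hrest : pvF (some (k1, q0.1, q0.2)) (qs.map (fun p => (k1, p.1, p.2)) ++ t1.flatMap (pvBlock zs))
          = pvF none ((k1 :: t1).flatMap (pvBlock zs)) := by
        rw [List.flatMap_cons, hblock1, List.cons_append]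
        rfl
      rw [hrest, ih ht (fun k' hk' => hne k' (List.mem_cons_of_mem _ hk'))]
      conv_rhs => rw [List.flatMap_cons, hmerge]
      simp

-- ---------- grouped flush list → dict ----------
lemma pv_foldl_add_mem (k : Int) : ∀ (l : List Int) (s : PySem.Set Int),
    (∀ x ∈ l, x = k) → k ∈ s → l.foldl PySem.Set.add s = s := by
  intro l
  induction l with
  | nil => intro s _ _; rfl
  | cons x t ih =>
    intro s hall hk
    rw [List.foldl_cons, hall x List.mem_cons_self, PySem.Set.add_of_mem hk]
    exact ih s (fun y hy => hall y (List.mem_cons_of_mem _ hy)) hk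

lemma pv_ofList_grouped : ∀ (ks : List Int) (g : Int → List Int) (s : List Int),
    ks.Nodup → (∀ k ∈ ks, g k ≠ [] ∧ ∀ x ∈ g k, x = k) → (∀ k ∈ ks, k ∉ s) →
    (ks.flatMap g).foldl PySem.Set.add s = s ++ ks := by
  intro ks
  induction ks with
  | nil => intro g s _ _ _; simp
  | cons k t ih =>
    intro g s hnd hblocks hout
    obtain ⟨hk, ht⟩ := List.nodup_cons.mp hnd
    rw [List.flatMap_cons, List.foldl_append]
    obtain ⟨hne, hall⟩ := hblocks k List.mem_cons_self
    obtain ⟨x, l, hxl⟩ := List.exists_cons_of_ne_nil hne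
    have hfold : (g k).foldl PySem.Set.add s = s ++ [k] := by
      rw [hxl, List.foldl_cons, hall x (hxl ▸ List.mem_cons_self),
        PySem.Set.add_of_not_mem (hout k List.mem_cons_self)]
      exact pv_foldl_add_mem k l (s ++ [k])
        (fun y hy => hall y (hxl ▸ List.mem_cons_of_mem _ hy))
        (List.mem_append_right _ List.mem_cons_self)
    rw [hfold, ih g (s ++ [k]) ht
      (fun k' hk' => hblocks k' (List.mem_cons_of_mem _ hk'))
      (fun k' hk' => by
        intro hmem
        rcases List.mem_append.mp hmem with h | h
        · exact hout k' (List.mem_cons_of_mem _ hk') h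
        · have : k' = k := by simpa using h
          exact hk (this ▸ hk')), List.append_assoc]
    rfl

lemma pv_gather_grouped_out (g : Int → List (Int × Int)) :
    ∀ (ks : List Int) (k : Int), k ∉ ks →
    (ks.flatMap (fun k' => (g k').map (fun p => (k', p)))).filter (fun p => p.1 == k) = [] := by
  intro ks
  induction ks with
  | nil => intro k _; rfl
  | cons k' t ih =>
    intro k hk
    have hne : k' ≠ k := fun he => hk (he ▸ List.mem_cons_self)
    rw [List.flatMap_cons, List.filter_append]
    have h1 : ((g k').map (fun p => (k', p))).filter (fun p => p.1 == k) = [] := by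
      rw [List.filter_map]
      have : ((fun p : Int × (Int × Int) => p.1 == k) ∘ (fun p : Int × Int => (k', p)))
          = fun _ => false := by
        funext p
        simpa using hne
      rw [this, List.filter_false, List.map_nil]
    rw [h1, List.nil_append]
    exact ih k (fun hmem => hk (List.mem_cons_of_mem _ hmem))

lemma pv_gather_grouped (g : Int → List (Int × Int)) :
    ∀ (ks : List Int) (k : Int), ks.Nodup → k ∈ ks →
    pvGather (ks.flatMap (fun k' => (g k').map (fun p => (k', p)))) k = g k := by
  intro ks
  induction ks with
  | nil => intro k _ hk; exact absurd hk (List.not_mem_nil)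
  | cons k' t ih =>
    intro k hnd hk
    obtain ⟨hk', ht⟩ := List.nodup_cons.mp hnd
    unfold pvGather
    rw [List.flatMap_cons, List.filter_append, List.map_append]
    by_cases h : k' = k
    · subst h
      have h1 : ((g k').map (fun p => (k', p))).filter (fun p => p.1 == k') = (g k').map (fun p => (k', p)) := by
        rw [List.filter_map]
        have : ((fun p : Int × (Int × Int) => p.1 == k') ∘ (fun p : Int × Int => (k', p)))
            = fun _ => true := by
          funext p; simp
        rw [this, List.filter_true]
      have h2 := pv_gather_grouped_out g t k' hk'
      rw [h1, h2, List.map_nil, List.append_nil, List.map_map]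
      have : ((fun p : Int × Int × Int => p.2) ∘ (fun p : Int × Int => (k', p))) = id := by
        funext p; rfl
      rw [this, List.map_id]
    · have hkt : k ∈ t := by
        rcases List.mem_cons.mp hk with he | hmem
        · exact absurd he.symm h
        · exact hmem
      have h1 : ((g k').map (fun p => (k', p))).filter (fun p => p.1 == k) = [] := by
        rw [List.filter_map]
        have : ((fun p : Int × (Int × Int) => p.1 == k) ∘ (fun p : Int × Int => (k', p)))
            = fun _ => false := by
          funext p; simpa using h
        rw [this, List.filter_false, List.map_nil]
      rw [h1, List.map_nil, List.nil_append]
      exact ih k ht hkt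

-- ---------- merge ----------
lemma pv_mergeStep_foldl : ∀ (t : List (Int × Int)) (acc : List (Int × Int)) (s e : Int),
    t.foldl pvMergeStep (acc ++ [(s, e)]) = acc ++ (pvMrec s e t).1 ++ [(pvMrec s e t).2] := by
  intro t
  induction t with
  | nil => intro acc s e; simp [pvMrec]
  | cons p r ih =>
    intro acc s e
    obtain ⟨a, b⟩ := p
    rw [List.foldl_cons]
    have hstep : pvMergeStep (acc ++ [(s, e)]) (a, b)
        = if a ≤ e + 1 then acc ++ [(s, max e b)] else (acc ++ [(s, e)]) ++ [(a, b)] := by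
      unfold pvMergeStep
      rw [List.getLast?_concat]
      dsimp only
      by_cases h : a ≤ e + 1
      · rw [if_pos h, if_pos h, List.dropLast_concat]
      · rw [if_neg h, if_neg h]
    by_cases h : a ≤ e + 1
    · have hm : pvMrec s e ((a, b) :: r) = pvMrec s (max e b) r := by
        show (if a ≤ e + 1 then pvMrec s (max e b) r
          else ((s, e) :: (pvMrec a b r).1, (pvMrec a b r).2)) = _
        rw [if_pos h]
      rw [hstep, if_pos h, hm]
      exact ih acc s (max e b)
    · have hm : pvMrec s e ((a, b) :: r) = ((s, e) :: (pvMrec a b r).1, (pvMrec a b r).2) := by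
        show (if a ≤ e + 1 then pvMrec s (max e b) r
          else ((s, e) :: (pvMrec a b r).1, (pvMrec a b r).2)) = _
        rw [if_neg h]
      rw [hstep, if_neg h, hm, ih (acc ++ [(s, e)]) a b]
      simp

lemma pv_mergeIntervals_eq (ps : List (Int × Int)) : pvMergeIntervals ps = pvMergeList ps := by
  cases ps with
  | nil => rfl
  | cons p t =>
    obtain ⟨s, e⟩ := p
    show t.foldl pvMergeStep [(s, e)] = (pvMrec s e t).1 ++ [(pvMrec s e t).2]
    have := pv_mergeStep_foldl t [] s e
    simpa using this

-- ---------- A = canon ----------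
lemma pv_foldl_range3 {δ : Type} (step : δ → Int → Int → Int → δ) :
    ∀ (rows ss es : List Int) (d : δ), rows.length ≤ ss.length → rows.length ≤ es.length →
    (PySem.List.pyRange 0 (PySem.List.len rows)).foldl
      (fun d i => step d (PySem.List.pyGetD rows i 0) (PySem.List.pyGetD ss i 0) (PySem.List.pyGetD es i 0)) d
    = (pvZip3 rows ss es).foldl (fun d t => step d t.1 t.2.1 t.2.2) d := by
  have aux : ∀ (rows ss es : List Int) (d : δ), rows.length ≤ ss.length → rows.length ≤ es.length →
      (List.range rows.length).foldl (fun d k => step d (rows.getD k 0) (ss.getD k 0) (es.getD k 0)) d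
      = (pvZip3 rows ss es).foldl (fun d t => step d t.1 t.2.1 t.2.2) d := by
    intro rows
    induction rows with
    | nil => intro ss es d _ _; simp [pvZip3]
    | cons r rt ih =>
      intro ss es d h1 h2
      cases ss with
      | nil => simp at h1
      | cons sh st =>
        cases es with
        | nil => simp at h2
        | cons eh et =>
          rw [List.length_cons, List.range_succ_eq_map, List.foldl_cons, List.foldl_map]
          simp only [List.getD_cons_zero, List.getD_cons_succ]
          have hz : pvZip3 (r :: rt) (sh :: st) (eh :: et) = (r, sh, eh) :: pvZip3 rt st et := rfl
          rw [hz, List.foldl_cons]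
          exact ih st et (step d r sh eh) (by simpa using h1) (by simpa using h2)
  intro rows ss es d h1 h2
  have hlen : PySem.List.len rows = (rows.length : Int) := rfl
  rw [hlen, PySem.List.pyRange_zero_natCast, List.foldl_map]
  simp only [PySem.List.pyGetD_natCast]
  exact aux rows ss es d h1 h2

lemma pv_A_eq_canon (rows ss es : List Int) (h1 : rows.length ≤ ss.length) (h2 : rows.length ≤ es.length) :
    rle_dict_from_arrays rows ss es = pvCanon (pvZip3 rows ss es) := by
  unfold rle_dict_from_arrays
  have hbr : ((PySem.List.pyRange 0 (PySem.List.len rows)).foldl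
      (fun d i => PySem.Dict.modify d (PySem.List.pyGetD rows i 0) []
        (fun l => l ++ [(PySem.List.pyGetD ss i 0, PySem.List.pyGetD es i 0)]))
      PySem.Dict.empty) = (pvZip3 rows ss es).foldl pvStep PySem.Dict.empty :=
    pv_foldl_range3 (fun d r s e => PySem.Dict.modify d r [] (fun l => l ++ [(s, e)]))
      rows ss es PySem.Dict.empty h1 h2
  rw [hbr, pvDictOf_items (pvZip3 rows ss es)]
  have hsorted : PySem.List.sorted
      ((PySem.Set.ofList ((pvZip3 rows ss es).map (fun t => t.1))).map
        (fun k => (k, pvGather (pvZip3 rows ss es) k))) (fun p => p.1)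
      = (pvSortedRows (pvZip3 rows ss es)).map (fun k => (k, pvGather (pvZip3 rows ss es) k)) := by
    apply PySem.List.sorted_eq_of_perm_of_pairwise_lt
    · exact (PySem.List.sorted_perm _ _ _).map _
    · rw [List.pairwise_map]
      exact PySem.List.sorted_ofList_pairwise_lt _
  rw [hsorted]
  rw [pv_items_foldl_insert
      (fun p => pvMergeIntervals (PySem.List.sorted2 p.2 (fun q => q.1) (fun q => q.2))) _
      PySem.Dict.empty (fun p _ => rfl)
      (by
        rw [List.map_map]
        have : ((fun p : Int × List (Int × Int) => p.1)
            ∘ (fun k => (k, pvGather (pvZip3 rows ss es) k))) = fun k => k := rfl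
        rw [this]
        simpa using pv_sortedRows_nodup (pvZip3 rows ss es))]
  show [] ++ _ = _
  rw [List.nil_append, List.map_map]
  unfold pvCanon
  apply List.map_congr_left
  intro k _
  simp only [Function.comp_apply]
  rw [pv_mergeIntervals_eq]
  rfl

-- ---------- B = canon ----------
lemma pv_B_eq_canon (rows ss es : List Int) :
    rle_dict_from_arrays_alt rows ss es = pvCanon (pvZip3 rows ss es) := by
  unfold rle_dict_from_arrays_alt
  have hzip : (rows.zip (ss.zip es)).map (fun t => (t.1, t.2.1, t.2.2)) = pvZip3 rows ss es := by
    unfold pvZip3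
    have : (fun t : Int × Int × Int => (t.1, t.2.1, t.2.2)) = id := by funext t; rfl
    rw [this, List.map_id]
  rw [hzip, pv_triples_eq_L, pv_sweep_finish]
  unfold pvL
  rw [pv_F_flat (pvZip3 rows ss es) _
    (by unfold pvSortedRows; exact PySem.List.sorted_ofList_pairwise_lt _)
    (fun k hk => pv_pk_ne_nil _ k hk)]
  rw [pvDictOf_items]
  have hmergene : ∀ k, pvPk (pvZip3 rows ss es) k ≠ [] →
      pvMergeList (pvPk (pvZip3 rows ss es) k) ≠ [] := by
    intro k hne
    obtain ⟨p0, ps, hps⟩ := List.exists_cons_of_ne_nil hne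
    obtain ⟨s0, e0⟩ := p0
    rw [hps]
    show (pvMrec s0 e0 ps).1 ++ [(pvMrec s0 e0 ps).2] ≠ []
    simp
  have hfst : (((pvSortedRows (pvZip3 rows ss es)).flatMap
        (fun k => (pvMergeList (pvPk (pvZip3 rows ss es) k)).map (fun p => (k, p)))).map (fun t => t.1))
      = (pvSortedRows (pvZip3 rows ss es)).flatMap
        (fun k => (pvMergeList (pvPk (pvZip3 rows ss es) k)).map (fun _ => k)) := by
    rw [List.map_flatMap]
    refine pv_flatMap_congr _ _ _ (fun k _ => ?_)
    rw [List.map_map]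
    rfl
  have hset : PySem.Set.ofList ((((pvSortedRows (pvZip3 rows ss es)).flatMap
        (fun k => (pvMergeList (pvPk (pvZip3 rows ss es) k)).map (fun p => (k, p))))).map (fun t => t.1))
      = pvSortedRows (pvZip3 rows ss es) := by
    rw [hfst, PySem.Set.ofList_eq_foldl]
    have h := pv_ofList_grouped (pvSortedRows (pvZip3 rows ss es))
      (fun k => (pvMergeList (pvPk (pvZip3 rows ss es) k)).map (fun _ => k)) []
      (pv_sortedRows_nodup _)
      (fun k hk => ⟨by
          have := hmergene k (pv_pk_ne_nil _ k hk)
          simpa using this,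
        fun x hx => by
          obtain ⟨_, _, rfl⟩ := List.mem_map.mp hx
          rfl⟩)
      (fun k _ => List.not_mem_nil)
    simpa using h
  rw [hset]
  unfold pvCanon
  apply List.map_congr_left
  intro k hk
  have := pv_gather_grouped (fun k => pvMergeList (pvPk (pvZip3 rows ss es) k))
    (pvSortedRows (pvZip3 rows ss es)) k (pv_sortedRows_nodup _) hk
  rw [this]

-- ===== VERDICT (by name: the statement is the Claim_ definition above) =====
theorem rle_dict_from_arrays_spec : Claim_equal_rle_dict_from_arrays := by
  intro rows ss es _hd hpre
  unfold Spec_rle_dict_from_arrays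
  rw [pv_A_eq_canon rows ss es hpre.1 hpre.2, pv_B_eq_canon]
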